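-- pv_equiv track=rewrite | github.com/AlexClowes/advent_of_code | 2019/01/complex_fuel_sum.py | fuel_cost
-- ===== SOURCE A (Python) =====
-- def fuel_cost(mass):
--     total = 0
--     while True:
--         mass = mass // 3 - 2
--         if mass < 0:
--             break
--         total += mass
--     return total
-- ===== SOURCE B (Python) =====
-- def fuel_cost(mass):
--     f = mass // 3 - 2
--     if f < 0:
--         return 0
--     return f + fuel_cost(f)
-- ===== Notes on version B (the rewrite author's own statement) =====
-- stated objective: simpler
-- what changed: Replaced the while-loop with an explicit accumulator by direct self-similar recursion: compute the next fuel step and, unless it is negative, add it to the recursive fuel cost of that step.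
import Mathlib
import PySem

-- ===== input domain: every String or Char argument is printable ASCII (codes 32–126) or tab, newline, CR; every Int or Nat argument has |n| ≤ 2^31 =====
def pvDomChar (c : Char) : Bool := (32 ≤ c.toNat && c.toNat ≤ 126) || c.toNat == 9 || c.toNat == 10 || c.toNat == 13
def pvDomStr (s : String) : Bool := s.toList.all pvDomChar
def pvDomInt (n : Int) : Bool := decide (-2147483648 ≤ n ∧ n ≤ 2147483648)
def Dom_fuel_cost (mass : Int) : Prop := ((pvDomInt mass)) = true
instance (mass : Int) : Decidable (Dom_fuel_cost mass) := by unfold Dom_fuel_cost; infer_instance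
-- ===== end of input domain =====

-- B replaces A's while-loop with an accumulator by direct self-similar recursion (objective: simpler).

-- termination measure lemma used by both ports' recursions
theorem pv_fuel_step_lt (mass : Int) (h : ¬ PySem.Int.floordiv mass 3 - 2 < 0) :
    (PySem.Int.floordiv mass 3 - 2).toNat < mass.toNat := by
  have e : PySem.Int.floordiv mass 3 = mass / 3 := by
    simp [PySem.Int.floordiv, Int.fdiv_eq_ediv]
  rw [e] at h ⊢
  omega

-- ===== PORT A =====
-- while True: mass = mass // 3 - 2; if mass < 0: break; total += mass
def fuel_cost_loop (mass total : Int) : Int :=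
  let m := PySem.Int.floordiv mass 3 - 2
  if h : m < 0 then total
  else fuel_cost_loop m (total + m)
termination_by mass.toNat
decreasing_by exact pv_fuel_step_lt mass h

def fuel_cost (mass : Int) : Int := fuel_cost_loop mass 0

-- ===== PORT B =====
def fuel_cost_alt (mass : Int) : Int :=
  let f := PySem.Int.floordiv mass 3 - 2
  if h : f < 0 then 0
  else f + fuel_cost_alt f
termination_by mass.toNat
decreasing_by exact pv_fuel_step_lt mass h

-- ===== PRECONDITION & SPEC =====
def Spec_fuel_cost (mass : Int) (out : Int) : Prop := out = fuel_cost_alt mass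
instance (mass : Int) (out : Int) : Decidable (Spec_fuel_cost mass out) := by unfold Spec_fuel_cost; infer_instance

-- ===== CLAIM (what is proved, stated in full; the proofs are below) =====
def Claim_equal_fuel_cost : Prop := ∀ (mass : Int), Dom_fuel_cost mass → Spec_fuel_cost mass (fuel_cost mass)

-- ===== LEMMAS AND PROOFS =====
theorem fuel_cost_loop_eq (mass total : Int) :
    fuel_cost_loop mass total = total + fuel_cost_alt mass := by
  rw [fuel_cost_loop, fuel_cost_alt]
  split_ifs with h
  · simp
  · rw [fuel_cost_loop_eq]
    ring
termination_by mass.toNat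
decreasing_by exact pv_fuel_step_lt mass h

-- ===== VERDICT (by name: the statement is the Claim_ definition above) =====
theorem fuel_cost_spec : Claim_equal_fuel_cost := by
  intro mass _
  unfold Spec_fuel_cost fuel_cost
  rw [fuel_cost_loop_eq]
  ring
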